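-- pv_equiv track=rewrite | github.com/elifesciences-publications/estaudel | estaudel/heredity/treeview.py | coalescent
-- ===== SOURCE A (Python) =====
-- def coalescent(nodes, branches):
--     """Compute the coalescent of some nodes.
--
--     Given a list of nodes and a list of branches, return the set of
--     nodes in the coalescent tree of the input.
--     """
--     parent_map = {child:parent for parent,child in branches}
--     coal = set(nodes)
--     parents = set(nodes)
--     while len(parents):
--         parents = set([parent_map[n] for n in parents if n in parent_map])
--         coal = coal.union(parents)
--     return coal
-- ===== SOURCE B (Python) =====
-- def coalescent(nodes, branches):
--     """Compute the coalescent of some nodes.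
--
--     Single-queue upward BFS with visited pruning: each node's parent
--     link is followed at most once, instead of re-climbing from every
--     already-collected node on every round.
--     """
--     parent_map = {child: parent for parent, child in branches}
--     order = []
--     seen = set()
--     for n in nodes:
--         if n not in seen:
--             seen.add(n)
--             order.append(n)
--     i = 0
--     while i < len(order):
--         p = parent_map.get(order[i])
--         if p is not None and p not in seen:
--             seen.add(p)
--             order.append(p)
--         i += 1
--     return set(order)
-- ===== Notes on version B (the rewrite author's own statement) =====
-- stated objective: alternative
-- what changed: Replaces A's level-by-level re-climb (each round recomputes the parent of EVERY frontier node, including ones whose ancestry was already collected) by a single visited-pruned work queue that follows each node's parent link at most once; intended as faster on deep ancestry chains (A re-climbs them quadratically) but measured only ~1.4x on random inputs, so no speed is claimed.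
import Mathlib
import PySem

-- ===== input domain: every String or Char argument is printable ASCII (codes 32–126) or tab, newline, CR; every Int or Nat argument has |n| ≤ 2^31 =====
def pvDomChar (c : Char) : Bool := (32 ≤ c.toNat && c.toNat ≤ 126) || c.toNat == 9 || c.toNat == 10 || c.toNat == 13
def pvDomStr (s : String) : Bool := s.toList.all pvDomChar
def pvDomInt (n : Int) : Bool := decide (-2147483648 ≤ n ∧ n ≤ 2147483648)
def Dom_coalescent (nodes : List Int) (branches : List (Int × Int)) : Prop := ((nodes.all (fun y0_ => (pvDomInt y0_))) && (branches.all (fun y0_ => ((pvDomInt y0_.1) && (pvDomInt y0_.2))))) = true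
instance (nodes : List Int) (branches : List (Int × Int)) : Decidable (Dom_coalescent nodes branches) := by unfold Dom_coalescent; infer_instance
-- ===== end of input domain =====

-- B replaces A's level-by-level re-climb (re-deriving the parent of every frontier node each
-- round) by a single visited-pruned work queue that follows each parent link at most once.


-- shared first line of both Pythons: parent_map = {child: parent for parent, child in branches}
def pvPM (branches : List (Int × Int)) : PySem.Dict Int Int :=
  branches.foldl (fun d pc => d.insert pc.2 pc.1) PySem.Dict.empty

-- ===== PORT A =====
-- while len(parents): parents = set([parent_map[n] for n in parents if n in parent_map]);
--                     coal = coal.union(parents)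
-- (fuel: |branches|+2 rounds; under Pre_ the frontier provably empties within that many rounds)
def pvALoop (pm : PySem.Dict Int Int) : Nat → PySem.Set Int → PySem.Set Int → PySem.Set Int
  | 0, coal, _ => coal
  | fuel+1, coal, parents =>
    if parents = [] then coal
    else
      let next := PySem.Set.ofList (parents.filterMap (fun n => pm.get? n))
      pvALoop pm fuel (PySem.Set.union coal next) next

def coalescent (nodes : List Int) (branches : List (Int × Int)) : List Int :=
  let pm := pvPM branches
  pvALoop pm (branches.length + 2) (PySem.Set.ofList nodes) (PySem.Set.ofList nodes)

-- ===== PORT B =====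
-- the queue 'order' with index i is carried as done (order[:i]) ++ pending (order[i:]);
-- fuel |nodes|+|branches|+1 bounds the number of loop iterations (= final queue length + 1)
def pvBLoop (pm : PySem.Dict Int Int) : Nat → List Int → List Int → PySem.Set Int → List Int
  | 0, done, pending, _ => done ++ pending
  | fuel+1, done, pending, seen =>
    match pending with
    | [] => done
    | n :: rest =>
      match pm.get? n with
      | some p =>
        if PySem.Set.contains seen p then pvBLoop pm fuel (done ++ [n]) rest seen
        else pvBLoop pm fuel (done ++ [n]) (rest ++ [p]) (PySem.Set.add seen p)
      | none => pvBLoop pm fuel (done ++ [n]) rest seen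

def coalescent_alt (nodes : List Int) (branches : List (Int × Int)) : List Int :=
  let pm := pvPM branches
  PySem.Set.ofList
    (pvBLoop pm (nodes.length + branches.length + 1) [] (PySem.Set.ofList nodes) (PySem.Set.ofList nodes))

-- ===== PRECONDITION & SPEC =====
-- k-fold parent lookup starting at n (the parent map is functional, so the ancestry of a node
-- is the single deterministic chain n, parent(n), parent(parent(n)), …)
def pvIter (pm : PySem.Dict Int Int) : Nat → Int → Option Int
  | 0, n => some n
  | k+1, n =>
    match pm.get? n with
    | some p => pvIter pm k p
    | none => none

-- Pre_ excludes EXACTLY the inputs on which Python A's while loop never terminates (so A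
-- returns nothing there): those where a cycle of the parent map is reachable from some input
-- node.  Since the parent map is functional, the chain upward from a node is deterministic and
-- either reaches a parentless node — revisiting no node, hence within |branches|+1 steps — or
-- runs into a cycle forever; Pre_ states the first alternative for every input node.  On every
-- input where A returns (including parent maps whose cycles are unreachable from nodes),
-- Pre_ holds and equality is proved.  pvIter is not a copy of either port's loop (A iterates a
-- whole frontier set, B runs a pruned queue): it merely follows the input's own parent chain,
-- which is the only finitely-checkable statement of 'no cycle reachable from nodes' (graph
-- reachability is a fixpoint; any quantifier-over-subsets form would be exponential).
def Pre_coalescent (nodes : List Int) (branches : List (Int × Int)) : Prop :=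
  ∀ x ∈ nodes, pvIter (pvPM branches) (branches.length + 1) x = none

instance (nodes : List Int) (branches : List (Int × Int)) : Decidable (Pre_coalescent nodes branches) := by
  unfold Pre_coalescent; infer_instance

def pvWitness_coalescent : List Int × (List (Int × Int)) := ([1, 2], [(3, 1), (4, 3)])

def Spec_coalescent (nodes : List Int) (branches : List (Int × Int)) (out : List Int) : Prop := out = coalescent_alt nodes branches
instance (nodes : List Int) (branches : List (Int × Int)) (out : List Int) : Decidable (Spec_coalescent nodes branches out) := by unfold Spec_coalescent; infer_instance

-- ===== CLAIM (what is proved, stated in full; the proofs are below) =====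
def Claim_equal_coalescent : Prop := ∀ (nodes : List Int) (branches : List (Int × Int)), Dom_coalescent nodes branches → Pre_coalescent nodes branches → Spec_coalescent nodes branches (coalescent nodes branches)

-- ===== LEMMAS AND PROOFS =====

-- ordered first-occurrence dedup of l, skipping anything in s (proof-side model of set insertion)
def pvDedup : List Int → List Int → List Int
  | [], _ => []
  | a :: l, s => if a ∈ s then pvDedup l s else a :: pvDedup l (s ++ [a])

-- one whole level of B's queue: parents of Q not yet seen, in discovery order, plus updated seen
def pvStep (pm : PySem.Dict Int Int) : List Int → PySem.Set Int → List Int × PySem.Set Int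
  | [], seen => ([], seen)
  | n :: Q, seen =>
    match pm.get? n with
    | some p =>
      if PySem.Set.contains seen p then pvStep pm Q seen
      else
        let r := pvStep pm Q (PySem.Set.add seen p)
        (p :: r.1, r.2)
    | none => pvStep pm Q seen

def pvUnseen (pm : PySem.Dict Int Int) (s : List Int) : Nat :=
  ((pm.values.dedup).filter (fun v => !decide (v ∈ s))).length

lemma pvSet_add_of_not_mem {s : List Int} {x : Int} (h : x ∉ s) : PySem.Set.add s x = s ++ [x] := by
  simp [PySem.Set.add, h]

lemma pvFoldAdd (l : List Int) : ∀ s : List Int, l.foldl PySem.Set.add s = s ++ pvDedup l s := by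
  induction l with
  | nil => intro s; simp [pvDedup]
  | cons a l ih =>
    intro s
    by_cases h : a ∈ s
    · have hadd : PySem.Set.add s a = s := by simp [PySem.Set.add, h]
      simp only [List.foldl_cons, hadd, pvDedup, if_pos h]
      exact ih s
    · simp only [List.foldl_cons, pvSet_add_of_not_mem h, pvDedup, if_neg h]
      rw [ih (s ++ [a])]
      simp

lemma pvOfList_eq (l : List Int) : PySem.Set.ofList l = pvDedup l [] := by
  rw [show PySem.Set.ofList l = l.foldl PySem.Set.add [] from rfl, pvFoldAdd]
  simp

lemma pvUnion_eq (s t : List Int) : PySem.Set.union s t = s ++ pvDedup t s := by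
  rw [show PySem.Set.union s t = t.foldl PySem.Set.add s from rfl, pvFoldAdd]

lemma pvMem_dedup {x : Int} (l : List Int) : ∀ s, x ∈ pvDedup l s ↔ x ∈ l ∧ x ∉ s := by
  induction l with
  | nil => intro s; simp [pvDedup]
  | cons a l ih =>
    intro s
    by_cases h : a ∈ s
    · simp only [pvDedup, if_pos h, ih, List.mem_cons]
      constructor
      · rintro ⟨h1, h2⟩; exact ⟨Or.inr h1, h2⟩
      · rintro ⟨h1 | h1, h2⟩
        · exact absurd (h1 ▸ h) h2
        · exact ⟨h1, h2⟩
    · simp only [pvDedup, if_neg h, List.mem_cons, ih, List.mem_append]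
      by_cases hxa : x = a
      · subst hxa; simp [h]
      · simp [hxa]

lemma pvNodup_dedup (l : List Int) : ∀ s, (pvDedup l s).Nodup := by
  induction l with
  | nil => intro s; simp [pvDedup]
  | cons a l ih =>
    intro s
    by_cases h : a ∈ s
    · simpa [pvDedup, if_pos h] using ih s
    · simp only [pvDedup, if_neg h, List.nodup_cons]
      refine ⟨fun hmem => ?_, ih _⟩
      have := (pvMem_dedup l (s ++ [a])).mp hmem
      simp at this

lemma pvDedup_congr (l : List Int) : ∀ s t, (∀ x ∈ l, (x ∈ s ↔ x ∈ t)) → pvDedup l s = pvDedup l t := by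
  induction l with
  | nil => intro s t _; simp [pvDedup]
  | cons a l ih =>
    intro s t h
    have ha := h a (by simp)
    by_cases hs : a ∈ s
    · rw [pvDedup, pvDedup, if_pos hs, if_pos (ha.mp hs)]
      exact ih s t (fun x hx => h x (List.mem_cons_of_mem _ hx))
    · rw [pvDedup, pvDedup, if_neg hs, if_neg (fun ht => hs (ha.mpr ht))]
      refine congrArg _ (ih _ _ fun x hx => ?_)
      simp only [List.mem_append, List.mem_singleton]
      rw [h x (List.mem_cons_of_mem _ hx)]

lemma pvDedup_filter (p : Int → Bool) (l : List Int) :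
    ∀ s, (pvDedup l s).filter p = pvDedup (l.filter p) s := by
  induction l with
  | nil => intro s; simp [pvDedup]
  | cons a l ih =>
    intro s
    by_cases hp : p a = true
    · by_cases hs : a ∈ s
      · rw [pvDedup, if_pos hs, List.filter_cons_of_pos hp, pvDedup, if_pos hs, ih]
      · rw [pvDedup, if_neg hs, List.filter_cons_of_pos hp, List.filter_cons_of_pos hp,
          pvDedup, if_neg hs, ih]
    · by_cases hs : a ∈ s
      · rw [pvDedup, if_pos hs, List.filter_cons_of_neg hp, ih]
      · rw [pvDedup, if_neg hs, List.filter_cons_of_neg hp, List.filter_cons_of_neg hp, ih]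
        refine pvDedup_congr _ _ _ fun x hx => ?_
        have hxp := (List.mem_filter.mp hx).2
        have hxa : x ≠ a := fun e => hp (e ▸ hxp)
        simp [hxa]

lemma pvDedup_filter_seen (C : List Int) (l : List Int) :
    ∀ s, pvDedup (l.filter (fun x => !decide (x ∈ C))) s = pvDedup l (C ++ s) := by
  induction l with
  | nil => intro s; simp [pvDedup]
  | cons a l ih =>
    intro s
    by_cases hC : a ∈ C
    · rw [List.filter_cons_of_neg (by simp [hC]), ih, pvDedup, if_pos (by simp [hC])]
    · rw [List.filter_cons_of_pos (by simp [hC])]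
      by_cases hs : a ∈ s
      · rw [pvDedup, if_pos hs, ih, pvDedup, if_pos (by simp [hs])]
      · rw [pvDedup, if_neg hs, pvDedup, if_neg (by simp [hC, hs]), ih]
        rw [show C ++ s ++ [a] = C ++ (s ++ [a]) by simp]

lemma pvDedup_of_nodup {l : List Int} (h : l.Nodup) :
    ∀ s, pvDedup l s = l.filter (fun x => !decide (x ∈ s)) := by
  induction l with
  | nil => intro s; simp [pvDedup]
  | cons a l ih =>
    intro s
    have hal : a ∉ l := (List.nodup_cons.mp h).1
    have hnd : l.Nodup := (List.nodup_cons.mp h).2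
    by_cases hs : a ∈ s
    · rw [pvDedup, if_pos hs, List.filter_cons_of_neg (by simp [hs]), ih hnd]
    · rw [pvDedup, if_neg hs, List.filter_cons_of_pos (by simp [hs]), ih hnd (s ++ [a])]
      refine congrArg _ (List.filter_congr fun x hx => ?_)
      have hxa : x ≠ a := fun e => hal (e ▸ hx)
      simp [hxa]

lemma pvStep_eq (pm : PySem.Dict Int Int) (Q : List Int) :
    ∀ seen, pvStep pm Q seen =
      (pvDedup (Q.filterMap (fun n => pm.get? n)) seen,
       seen ++ pvDedup (Q.filterMap (fun n => pm.get? n)) seen) := by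
  induction Q with
  | nil => intro seen; simp [pvStep, pvDedup]
  | cons n Q ih =>
    intro seen
    cases hg : pm.get? n with
    | none => simp only [pvStep, hg, List.filterMap_cons]; exact ih seen
    | some p =>
      by_cases hp : p ∈ seen
      · have hc : PySem.Set.contains seen p = true := (PySem.Set.contains_iff seen p).mpr hp
        simp only [pvStep, hg, hc, if_true, List.filterMap_cons, pvDedup, if_pos hp]
        exact ih seen
      · have hc : PySem.Set.contains seen p = false := by
          cases hcs : PySem.Set.contains seen p
          · rfl
          · exact absurd ((PySem.Set.contains_iff seen p).mp hcs) hp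
        simp only [pvStep, hg, hc, Bool.false_eq_true, if_false, List.filterMap_cons,
          pvSet_add_of_not_mem hp, pvDedup, if_neg hp, ih (seen ++ [p])]
        simp

lemma pvBLoop_block (pm : PySem.Dict Int Int) (Q : List Int) :
    ∀ fuel done rest seen,
      pvBLoop pm (Q.length + fuel) done (Q ++ rest) seen
        = pvBLoop pm fuel (done ++ Q) (rest ++ (pvStep pm Q seen).1) (pvStep pm Q seen).2 := by
  induction Q with
  | nil => intro fuel done rest seen; simp [pvStep]
  | cons n Q ih =>
    intro fuel done rest seen
    have hlen : (n :: Q).length + fuel = (Q.length + fuel) + 1 := by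
      rw [List.length_cons]; omega
    rw [hlen]
    show pvBLoop pm ((Q.length + fuel) + 1) done (n :: (Q ++ rest)) seen = _
    cases hg : pm.get? n with
    | none =>
      simp only [pvBLoop, hg]
      rw [ih fuel (done ++ [n]) rest seen]
      simp only [pvStep, hg]
      rw [show done ++ [n] ++ Q = done ++ n :: Q by simp]
    | some p =>
      by_cases hp : PySem.Set.contains seen p = true
      · simp only [pvBLoop, hg, hp, if_true]
        rw [ih fuel (done ++ [n]) rest seen]
        simp only [pvStep, hg, hp, if_true]
        rw [show done ++ [n] ++ Q = done ++ n :: Q by simp]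
      · have hc : PySem.Set.contains seen p = false := by
          cases hcs : PySem.Set.contains seen p
          · rfl
          · exact absurd hcs hp
        simp only [pvBLoop, hg, hc, Bool.false_eq_true, if_false]
        rw [show (Q ++ rest) ++ [p] = Q ++ (rest ++ [p]) by simp]
        rw [ih fuel (done ++ [n]) (rest ++ [p]) (PySem.Set.add seen p)]
        simp only [pvStep, hg, hc, Bool.false_eq_true, if_false]
        rw [show done ++ [n] ++ Q = done ++ n :: Q by simp]
        simp

lemma pvFilterMap_sublist_eq (pm : PySem.Dict Int Int) (C : List Int) :
    ∀ {L fA : List Int}, L.Sublist fA → fA.Nodup →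
      (∀ m ∈ fA, m ∉ L → ∀ p, pm.get? m = some p → p ∈ C) →
      (fA.filterMap (fun n => pm.get? n)).filter (fun x => !decide (x ∈ C))
        = (L.filterMap (fun n => pm.get? n)).filter (fun x => !decide (x ∈ C)) := by
  intro L fA hs
  induction hs with
  | slnil => intro _ _; rfl
  | @cons L fA a hs ih =>
    intro hnd hC
    have hnd' := (List.nodup_cons.mp hnd).2
    have haL : a ∉ L := fun hmem => (List.nodup_cons.mp hnd).1 (hs.subset hmem)
    have hrec := ih hnd' (fun m hm hmL p hp => hC m (List.mem_cons_of_mem _ hm) hmL p hp)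
    cases hg : pm.get? a with
    | none => simp only [List.filterMap_cons, hg]; exact hrec
    | some p =>
      have hpC : p ∈ C := hC a List.mem_cons_self haL p hg
      simp only [List.filterMap_cons, hg]
      rw [List.filter_cons_of_neg (by simp [hpC])]
      exact hrec
  | @cons₂ L fA a hs ih =>
    intro hnd hC
    have hnd' := (List.nodup_cons.mp hnd).2
    have hrec : (fA.filterMap (fun n => pm.get? n)).filter (fun x => !decide (x ∈ C))
        = (L.filterMap (fun n => pm.get? n)).filter (fun x => !decide (x ∈ C)) := by
      refine ih hnd' fun m hm hmL p hp => ?_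
      have hma : m ≠ a := fun e => (List.nodup_cons.mp hnd).1 (e ▸ hm)
      exact hC m (List.mem_cons_of_mem _ hm) (by simp [hmL, hma]) p hp
    cases hg : pm.get? a with
    | none => simp only [List.filterMap_cons, hg]; exact hrec
    | some p =>
      simp only [List.filterMap_cons, hg, List.filter_cons]
      rw [hrec]

lemma pvStable (pm : PySem.Dict Int Int) (C : List Int)
    (hC : ∀ m ∈ C, ∀ p, pm.get? m = some p → p ∈ C) :
    ∀ (fa : Nat) (fA : List Int), (∀ x ∈ fA, x ∈ C) → pvALoop pm fa C fA = C := by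
  intro fa
  induction fa with
  | zero => intro fA _; rfl
  | succ fa ih =>
    intro fA hsub
    by_cases hfA : fA = []
    · simp only [pvALoop, if_pos hfA]
    · simp only [pvALoop, if_neg hfA]
      have hnext' : ∀ x ∈ PySem.Set.ofList (fA.filterMap (fun n => pm.get? n)), x ∈ C := by
        intro x hx
        obtain ⟨m, hm, hgm⟩ := List.mem_filterMap.mp ((PySem.Set.mem_ofList _ _).mp hx)
        exact hC m (hsub m hm) x hgm
      have hdd : pvDedup (PySem.Set.ofList (fA.filterMap (fun n => pm.get? n))) C = [] := by
        refine List.eq_nil_iff_forall_not_mem.mpr fun x hx => ?_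
        have h2 := (pvMem_dedup _ _).mp hx
        exact h2.2 (hnext' x h2.1)
      rw [pvUnion_eq, hdd, List.append_nil]
      exact ih _ hnext'

lemma pvIter_none_succ (pm : PySem.Dict Int Int) : ∀ (k : Nat) (n : Int),
    pvIter pm k n = none → pvIter pm (k+1) n = none := by
  intro k
  induction k with
  | zero => intro n h; exact absurd h (by simp [pvIter])
  | succ k ih =>
    intro n h
    cases hg : pm.get? n with
    | none => simp [pvIter, hg]
    | some p =>
      have h' : pvIter pm k p = none := by simpa [pvIter, hg] using h
      simpa [pvIter, hg] using ih p h'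

lemma pvMem_values_of_get? {pm : PySem.Dict Int Int} {k v : Int} (h : pm.get? k = some v) :
    v ∈ pm.values := by
  have hi : (k, v) ∈ pm.items := PySem.Dict.mem_items_of_get?_eq_some pm h
  rw [show pm.values = pm.items.map Prod.snd from rfl]
  exact List.mem_map.mpr ⟨(k, v), hi, rfl⟩

lemma pvCount (pm : PySem.Dict Int Int) {L' s : List Int} (hnd : L'.Nodup)
    (hval : ∀ x ∈ L', x ∈ pm.values) (hdis : ∀ x ∈ L', x ∉ s) :
    L'.length + pvUnseen pm (s ++ L') ≤ pvUnseen pm s := by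
  unfold pvUnseen
  have hVnd : (pm.values.dedup).Nodup := List.nodup_dedup _
  have h1 : (pm.values.dedup).filter (fun v => !decide (v ∈ s ++ L'))
      = ((pm.values.dedup).filter (fun v => !decide (v ∈ s))).filter (fun v => !decide (v ∈ L')) := by
    rw [List.filter_filter]
    refine List.filter_congr fun x _ => ?_
    by_cases h1 : x ∈ s <;> by_cases h2 : x ∈ L' <;> simp [h1, h2]
  have hsplit := (List.filter_append_perm (fun v => decide (v ∈ L'))
    ((pm.values.dedup).filter (fun v => !decide (v ∈ s)))).length_eq
  rw [List.length_append] at hsplit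
  have hsubW : L' ⊆ ((pm.values.dedup).filter (fun v => !decide (v ∈ s))).filter
      (fun v => decide (v ∈ L')) := by
    intro x hx
    refine List.mem_filter.mpr ⟨List.mem_filter.mpr ⟨List.mem_dedup.mpr (hval x hx), ?_⟩, by simp [hx]⟩
    simp [hdis x hx]
  have hlen : L'.length ≤ (((pm.values.dedup).filter (fun v => !decide (v ∈ s))).filter
      (fun v => decide (v ∈ L'))).length := (hnd.subperm hsubW).length_le
  rw [h1]
  omega

lemma pvItems_le (branches : List (Int × Int)) :
    (pvPM branches).items.length ≤ branches.length := by
  have aux : ∀ (bs : List (Int × Int)) (d : PySem.Dict Int Int),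
      (bs.foldl (fun d pc => d.insert pc.2 pc.1) d).items.length ≤ d.items.length + bs.length := by
    intro bs
    induction bs with
    | nil => intro d; simp
    | cons b bs ih =>
      intro d
      have h1 := ih (d.insert b.2 b.1)
      have h2 : (d.insert b.2 b.1).items.length ≤ d.items.length + 1 := by
        have hsz := PySem.Dict.size_insert d b.2 b.1
        simp only [PySem.Dict.size] at hsz
        split_ifs at hsz <;> omega
      simp only [List.foldl_cons, List.length_cons]
      omega
  have := aux branches PySem.Dict.empty
  simpa [pvPM, PySem.Dict.empty] using this

lemma pvValues_le (branches : List (Int × Int)) :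
    (pvPM branches).values.length ≤ branches.length := by
  have hv : (pvPM branches).values.length = (pvPM branches).items.length := by
    rw [show (pvPM branches).values = (pvPM branches).items.map Prod.snd from rfl, List.length_map]
  rw [hv]
  exact pvItems_le branches

lemma pvMain (pm : PySem.Dict Int Int) : ∀ (fa fb : Nat) (done L fA : List Int),
    L.Sublist fA → fA.Nodup →
    (∀ x ∈ fA, x ∈ done ++ L) →
    (∀ m ∈ done, ∀ p, pm.get? m = some p → p ∈ done ++ L) →
    (done ++ L).Nodup →
    (∀ x ∈ fA, pvIter pm fa x = none) →
    L.length + pvUnseen pm (done ++ L) + 1 ≤ fb →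
    pvALoop pm fa (done ++ L) fA = pvBLoop pm fb done L (done ++ L) := by
  intro fa
  induction fa with
  | zero =>
    intro fb done L fA hsub hnd hfAc hclose hcd hiter hfb
    have hfA : fA = [] := by
      cases fA with
      | nil => rfl
      | cons x t => exact absurd (hiter x List.mem_cons_self) (by simp [pvIter])
    subst hfA
    have hL : L = [] := List.sublist_nil.mp hsub
    subst hL
    cases fb with
    | zero => omega
    | succ fb => simp [pvALoop, pvBLoop]
  | succ fa ih =>
    intro fb done L fA hsub hnd hfAc hclose hcd hiter hfb
    by_cases hfA : fA = []
    · subst hfA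
      have hL : L = [] := List.sublist_nil.mp hsub
      subst hL
      cases fb with
      | zero => omega
      | succ fb => simp [pvALoop, pvBLoop]
    · by_cases hL : L = []
      · subst hL
        have hstable := pvStable pm (done ++ []) (by simpa using hclose) (fa + 1) fA hfAc
        cases fb with
        | zero => omega
        | succ fb =>
          rw [hstable]
          simp [pvBLoop]
      · have hKEY : (PySem.Set.ofList (fA.filterMap (fun n => pm.get? n))).filter
            (fun x => !decide (x ∈ done ++ L))
            = pvDedup (L.filterMap (fun n => pm.get? n)) (done ++ L) := by
          rw [pvOfList_eq, pvDedup_filter,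
            pvFilterMap_sublist_eq pm (done ++ L) hsub hnd ?hold,
            pvDedup_filter_seen, List.append_nil]
          case hold =>
            intro m hm hmL p hp
            have hmC : m ∈ done := by
              rcases List.mem_append.mp (hfAc m hm) with h | h
              · exact h
              · exact absurd h hmL
            exact hclose m hmC p hp
        have hnextnd : (PySem.Set.ofList (fA.filterMap (fun n => pm.get? n))).Nodup :=
          PySem.Set.nodup_ofList _
        have hAstep : pvALoop pm (fa + 1) (done ++ L) fA
            = pvALoop pm fa ((done ++ L) ++ pvDedup (L.filterMap (fun n => pm.get? n)) (done ++ L))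
              (PySem.Set.ofList (fA.filterMap (fun n => pm.get? n))) := by
          simp only [pvALoop, if_neg hfA]
          rw [pvUnion_eq, pvDedup_of_nodup hnextnd, hKEY]
        have hstep := pvStep_eq pm L (done ++ L)
        have hBstep : pvBLoop pm fb done L (done ++ L)
            = pvBLoop pm (fb - L.length) (done ++ L)
              (pvDedup (L.filterMap (fun n => pm.get? n)) (done ++ L))
              ((done ++ L) ++ pvDedup (L.filterMap (fun n => pm.get? n)) (done ++ L)) := by
          obtain ⟨fb', hfb'⟩ : ∃ fb', fb = L.length + fb' := ⟨fb - L.length, by omega⟩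
          subst hfb'
          have hblock := pvBLoop_block pm L fb' done [] (done ++ L)
          rw [List.append_nil, hstep] at hblock
          rw [show L.length + fb' - L.length = fb' by omega]
          exact hblock.trans (by simp)
        rw [hAstep, hBstep]
        have hmemL' : ∀ x ∈ pvDedup (L.filterMap (fun n => pm.get? n)) (done ++ L),
            x ∈ L.filterMap (fun n => pm.get? n) ∧ x ∉ done ++ L :=
          fun x hx => (pvMem_dedup _ _).mp hx
        refine ih (fb - L.length) (done ++ L) _ _ ?_ hnextnd ?_ ?_ ?_ ?_ ?_
        · rw [← hKEY]; exact List.filter_sublist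
        · intro x hx
          by_cases hxC : x ∈ done ++ L
          · exact List.mem_append.mpr (Or.inl hxC)
          · refine List.mem_append.mpr (Or.inr ?_)
            rw [← hKEY]
            exact List.mem_filter.mpr ⟨hx, by simp [hxC]⟩
        · intro m hm p hp
          rcases List.mem_append.mp hm with hmd | hmL
          · exact List.mem_append.mpr (Or.inl (hclose m hmd p hp))
          · by_cases hpC : p ∈ done ++ L
            · exact List.mem_append.mpr (Or.inl hpC)
            · refine List.mem_append.mpr (Or.inr ?_)
              exact (pvMem_dedup _ _).mpr ⟨List.mem_filterMap.mpr ⟨m, hmL, hp⟩, hpC⟩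
        · refine List.Nodup.append hcd (pvNodup_dedup _ _) ?_
          intro x hx1 hx2
          exact (hmemL' x hx2).2 hx1
        · intro x hx
          obtain ⟨m, hm, hgm⟩ := List.mem_filterMap.mp ((PySem.Set.mem_ofList _ _).mp hx)
          have hit := hiter m hm
          simpa [pvIter, hgm] using hit
        · have hvals : ∀ x ∈ pvDedup (L.filterMap (fun n => pm.get? n)) (done ++ L),
              x ∈ pm.values := by
            intro x hx
            obtain ⟨m, _, hgm⟩ := List.mem_filterMap.mp (hmemL' x hx).1
            exact pvMem_values_of_get? hgm
          have hcount := pvCount pm (pvNodup_dedup _ _) hvals (fun x hx => (hmemL' x hx).2)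
          omega

lemma pvANodup (pm : PySem.Dict Int Int) : ∀ (fa : Nat) (coal fA : List Int),
    coal.Nodup → (pvALoop pm fa coal fA).Nodup := by
  intro fa
  induction fa with
  | zero => intro coal fA h; exact h
  | succ fa ih =>
    intro coal fA h
    by_cases hfA : fA = []
    · simp only [pvALoop, if_pos hfA]; exact h
    · simp only [pvALoop, if_neg hfA]
      refine ih _ _ ?_
      rw [pvUnion_eq]
      refine List.Nodup.append h (pvNodup_dedup _ _) ?_
      intro x hx1 hx2
      exact ((pvMem_dedup _ _).mp hx2).2 hx1

-- ===== VERDICT (by name: the statement is the Claim_ definition above) =====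
theorem coalescent_spec : Claim_equal_coalescent := by
  unfold Claim_equal_coalescent
  intro nodes branches _ hpre
  unfold Spec_coalescent
  show pvALoop (pvPM branches) (branches.length + 2) (PySem.Set.ofList nodes) (PySem.Set.ofList nodes)
      = PySem.Set.ofList (pvBLoop (pvPM branches) (nodes.length + branches.length + 1) []
          (PySem.Set.ofList nodes) (PySem.Set.ofList nodes))
  have hS : (PySem.Set.ofList nodes).Nodup := PySem.Set.nodup_ofList nodes
  have hiter0 : ∀ x ∈ PySem.Set.ofList nodes,
      pvIter (pvPM branches) (branches.length + 2) x = none := by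
    intro x hx
    exact pvIter_none_succ _ _ _ (hpre x ((PySem.Set.mem_ofList _ _).mp hx))
  have hfuel : (PySem.Set.ofList nodes).length
      + pvUnseen (pvPM branches) ([] ++ PySem.Set.ofList nodes) + 1
      ≤ nodes.length + branches.length + 1 := by
    have h1 : (PySem.Set.ofList nodes).length ≤ nodes.length := PySem.Set.length_ofList_le nodes
    have h2 : pvUnseen (pvPM branches) ([] ++ PySem.Set.ofList nodes)
        ≤ (pvPM branches).values.dedup.length := by
      unfold pvUnseen; exact List.length_filter_le _ _
    have h3 : (pvPM branches).values.dedup.length ≤ (pvPM branches).values.length :=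
      ((pvPM branches).values.dedup_sublist).length_le
    have h4 := pvValues_le branches
    omega
  have hmain := pvMain (pvPM branches) (branches.length + 2) (nodes.length + branches.length + 1)
      [] (PySem.Set.ofList nodes) (PySem.Set.ofList nodes)
      (List.Sublist.refl _) hS (by intro x hx; simpa using hx)
      (by intro m hm; simp at hm) (by simpa using hS) hiter0 hfuel
  rw [List.nil_append] at hmain
  rw [← hmain]
  exact (PySem.Set.ofList_eq_self_of_nodup _ (pvANodup (pvPM branches) (branches.length + 2)
    (PySem.Set.ofList nodes) (PySem.Set.ofList nodes) hS)).symm
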